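-- pv_equiv track=rewrite | github.com/LoganKloft/aoc2023 | day_1_trebuchet/part2.py | findFirstNum
-- ===== SOURCE A (Python) =====
-- forward = [
--     "one",
--     "two",
--     "three",
--     "four",
--     "five",
--     "six",
--     "seven",
--     "eight",
--     "nine",
--     "1",
--     "2",
--     "3",
--     "4",
--     "5",
--     "6",
--     "7",
--     "8",
--     "9",
--     "0",
-- ]
--
-- wordToNumAsString = {
--     "one": "1",
--     "two": "2",
--     "three": "3",
--     "four": "4",
--     "five": "5",
--     "six": "6",
--     "seven": "7",
--     "eight": "8",
--     "nine": "9",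
--     "1": "1",
--     "2": "2",
--     "3": "3",
--     "4": "4",
--     "5": "5",
--     "6": "6",
--     "7": "7",
--     "8": "8",
--     "9": "9",
--     "0": "0",
-- }
--
-- def findFirstNum(line):
--     first = -1
--     word = "0"
--     for target in forward:
--         i = line.find(target)
--         if i != -1 and (i < first or first == -1):
--             first = i
--             word = target
--
--     return wordToNumAsString[word]
-- ===== SOURCE B (Python) =====
-- words = {
--     "one": "1", "two": "2", "three": "3", "four": "4", "five": "5",
--     "six": "6", "seven": "7", "eight": "8", "nine": "9",
-- }
--
-- def findFirstNum(line):
--     # single left-to-right positional scan with early exit: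
--     # a literal digit character wins immediately; otherwise try the nine
--     # spelled-out digit words at this position.
--     for i, ch in enumerate(line):
--         if "0" <= ch <= "9":
--             return ch
--         for w, d in words.items():
--             if line.startswith(w, i):
--                 return d
--     return "0"
-- ===== Notes on version B (the rewrite author's own statement) =====
-- stated objective: alternative
-- what changed: Instead of running line.find once for each of the 19 targets and keeping the minimal index, B scans character positions left-to-right once with early exit: a digit character is returned directly, otherwise the nine digit words are tried at that position via startswith; no target list and no word-to-digit dict lookup at the end.
import Mathlib
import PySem

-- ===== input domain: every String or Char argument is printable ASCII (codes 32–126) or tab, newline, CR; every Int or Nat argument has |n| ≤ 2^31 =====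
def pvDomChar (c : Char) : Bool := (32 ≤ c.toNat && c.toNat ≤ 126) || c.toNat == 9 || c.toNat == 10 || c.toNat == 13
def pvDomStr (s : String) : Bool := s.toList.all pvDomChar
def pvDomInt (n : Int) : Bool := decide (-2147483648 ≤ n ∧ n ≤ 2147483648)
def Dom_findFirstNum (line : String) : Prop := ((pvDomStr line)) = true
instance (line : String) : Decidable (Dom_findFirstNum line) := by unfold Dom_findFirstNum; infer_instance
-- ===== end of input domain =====

-- B replaces A's 19 full-line `find` passes by a single left-to-right positional scan
-- with early exit: a digit character returns itself, otherwise the nine digit words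
-- are tried at that position (objective: alternative).

-- ===== PORT A =====
def pvForward : List String :=
  ["one","two","three","four","five","six","seven","eight","nine",
   "1","2","3","4","5","6","7","8","9","0"]

def pvW2N : PySem.Dict String String :=
  PySem.Dict.ofList
    [("one","1"),("two","2"),("three","3"),("four","4"),("five","5"),
     ("six","6"),("seven","7"),("eight","8"),("nine","9"),
     ("1","1"),("2","2"),("3","3"),("4","4"),("5","5"),("6","6"),
     ("7","7"),("8","8"),("9","9"),("0","0")]

-- `word` is always a key of the dict, so Python's KeyError branch (get? = none) is unreachable.
def findFirstNum (line : String) : String :=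
  let st := pvForward.foldl (fun st target =>
    let i := PySem.Str.find line target
    if i ≠ -1 ∧ (i < st.1 ∨ st.1 = -1) then (i, target) else st) ((-1 : Int), "0")
  (pvW2N.get? st.2).getD ""

-- ===== PORT B =====
-- Source B's `words` dict, as (word, digit) pairs.
def pvWords : List (String × String) :=
  [("one","1"),("two","2"),("three","3"),("four","4"),("five","5"),
   ("six","6"),("seven","7"),("eight","8"),("nine","9")]

-- Source B's outer loop over positions is this recursion on suffixes; `"0" <= ch <= "9"`
-- is the char comparison, the inner loop over words.items() with early return is `find?`.
def pvScanB : List Char → String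
  | [] => "0"
  | c :: rest =>
    if '0' ≤ c ∧ c ≤ '9' then String.ofList [c]
    else
      match pvWords.find? (fun p => PySem.Chars.startswith (c :: rest) p.1.toList) with
      | some p => p.2
      | none => pvScanB rest

def findFirstNum_alt (line : String) : String := pvScanB line.toList

-- ===== PRECONDITION & SPEC =====
def Spec_findFirstNum (line : String) (out : String) : Prop := out = findFirstNum_alt line
instance (line : String) (out : String) : Decidable (Spec_findFirstNum line out) := by unfold Spec_findFirstNum; infer_instance

-- ===== CLAIM (what is proved, stated in full; the proofs are below) =====
def Claim_equal_findFirstNum : Prop := ∀ (line : String), Dom_findFirstNum line → Spec_findFirstNum line (findFirstNum line)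

-- ===== LEMMAS AND PROOFS =====

-- Reference scan: returns the pvForward target matching at the earliest position, via its dict digit.
def pvScanRef : List Char → String
  | [] => "0"
  | c :: rest =>
    match pvForward.find? (fun t => PySem.Chars.startswith (c :: rest) t.toList) with
    | some t => (pvW2N.get? t).getD ""
    | none => pvScanRef rest

-- A's fold step, abstracted over the position function f (f target = line.find(target)).
def pvStep (f : String → Int) (st : Int × String) (t : String) : Int × String :=
  if f t ≠ -1 ∧ (f t < st.1 ∨ st.1 = -1) then (f t, t) else st

-- A's fold on the character-list side.
def pvChFold (cs : List Char) : Int × String :=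
  pvForward.foldl (pvStep (fun t => PySem.Chars.find cs t.toList)) ((-1 : Int), "0")

-- how a `find` result shifts when one leading character is dropped
def pvShift (x : Int) : Int := if x = -1 then -1 else x + 1

lemma pvA_bridge (line : String) :
    findFirstNum line = (pvW2N.get? (pvChFold line.toList).2).getD "" := by
  have h : (pvStep fun t => PySem.Chars.find line.toList t.toList)
      = fun (st : Int × String) (target : String) =>
        let i := PySem.Str.find line target
        if i ≠ -1 ∧ (i < st.1 ∨ st.1 = -1) then (i, target) else st := by
    funext st t; simp [pvStep]
  simp [findFirstNum, pvChFold, h]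

lemma pv_find_zero_of_startswith (s t : List Char)
    (h : PySem.Chars.startswith s t = true) : PySem.Chars.find s t = 0 := by
  have hp : t <+: s := (PySem.Chars.startswith_iff s t).mp h
  have h0 : 0 ≤ PySem.Chars.find s t := (PySem.Chars.find_nonneg_iff s t).mpr hp.isInfix
  rcases PySem.Chars.find_spec h0 with ⟨_, hmin⟩
  by_contra hne
  have hnp : ¬ t <+: List.drop 0 s := hmin 0 (by omega)
  simp at hnp; exact hnp hp

lemma pv_startswith_of_find_zero (s t : List Char)
    (h : PySem.Chars.find s t = 0) : PySem.Chars.startswith s t = true := by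
  rcases PySem.Chars.find_spec (s := s) (sub := t) (by omega) with ⟨hpre, _⟩
  rw [h] at hpre
  simp at hpre
  exact (PySem.Chars.startswith_iff s t).mpr hpre

lemma pv_find_cons (c : Char) (s t : List Char)
    (h : PySem.Chars.startswith (c :: s) t = false) :
    PySem.Chars.find (c :: s) t = pvShift (PySem.Chars.find s t) := by
  have hns : ¬ t <+: (c :: s) := by
    intro hp; rw [(PySem.Chars.startswith_iff _ _).mpr hp] at h; exact Bool.false_ne_true h.symm
  by_cases hfs : PySem.Chars.find s t = -1
  · have hni : ¬ t <:+: s := (PySem.Chars.find_eq_neg_one_iff s t).mp hfs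
    have hnc : ¬ t <:+: (c :: s) := by
      intro hi
      have hex : ∃ j, t <+: (c :: s).drop j := by
        rw [PySem.Chars.exists_prefix_drop_iff_isIn, PySem.Chars.isIn_iff_infix]; exact hi
      rcases hex with ⟨j, hj⟩
      cases j with
      | zero => simp at hj; exact hns hj
      | succ k =>
        apply hni
        have hk : t <+: s.drop k := by simpa using hj
        have hex' : ∃ j, t <+: s.drop j := ⟨k, hk⟩
        rw [PySem.Chars.exists_prefix_drop_iff_isIn, PySem.Chars.isIn_iff_infix] at hex'
        exact hex'
    rw [(PySem.Chars.find_eq_neg_one_iff _ _).mpr hnc, hfs]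
    rfl
  · have h0 : 0 ≤ PySem.Chars.find s t := by
      have := PySem.Chars.neg_one_le_find (s := s) (sub := t); omega
    rcases PySem.Chars.find_spec (s := s) (sub := t) h0 with ⟨hpre, hmin⟩
    have hin : t <:+: (c :: s) := by
      have hi : t <:+: s := (PySem.Chars.find_nonneg_iff s t).mp h0
      exact hi.trans (List.suffix_cons c s).isInfix
    have h0' : 0 ≤ PySem.Chars.find (c :: s) t := (PySem.Chars.find_nonneg_iff _ _).mpr hin
    rcases PySem.Chars.find_spec (s := (c :: s)) (sub := t) h0' with ⟨hpre', hmin'⟩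
    set m := (PySem.Chars.find (c :: s) t).toNat with hm
    set k := (PySem.Chars.find s t).toNat with hk
    have hm0 : m ≠ 0 := by
      intro h0m; rw [h0m] at hpre'; simp at hpre'; exact hns hpre'
    have h1 : k ≤ m - 1 := by
      by_contra hlt
      apply hmin (m - 1) (by omega)
      have hd : (c :: s).drop m = s.drop (m - 1) := by
        rw [show m = (m - 1) + 1 by omega]; simp
      rwa [hd] at hpre'
    have h2 : m ≤ k + 1 := by
      by_contra hlt
      apply hmin' (k + 1) (by omega)
      simpa using hpre
    unfold pvShift
    rw [if_neg hfs]
    omega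

lemma pv_fold_stuck (f : String → Int) (ts : List String) (w : String)
    (h : ∀ t ∈ ts, -1 ≤ f t) :
    ts.foldl (pvStep f) ((0 : Int), w) = ((0 : Int), w) := by
  induction ts with
  | nil => rfl
  | cons t ts ih =>
    have ht := h t (by simp)
    have h1 : pvStep f ((0 : Int), w) t = ((0 : Int), w) := by
      unfold pvStep; rw [if_neg]; simp; omega
    rw [List.foldl_cons, h1]
    exact ih (fun t' ht' => h t' (by simp [ht']))

lemma pv_fold_hit (f : String → Int) (l₁ l₂ : List String) (t0 : String)
    (h1 : ∀ t ∈ l₁, f t ≠ 0) (h0 : f t0 = 0)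
    (hall : ∀ t ∈ l₁ ++ t0 :: l₂, -1 ≤ f t) :
    ∀ st : Int × String, (st.1 = -1 ∨ 0 < st.1) →
      ((l₁ ++ t0 :: l₂).foldl (pvStep f) st).2 = t0 := by
  induction l₁ with
  | nil =>
    intro st hst
    have hs : pvStep f st t0 = ((0 : Int), t0) := by
      unfold pvStep; rw [h0, if_pos (by omega)]
    simp only [List.nil_append, List.foldl_cons, hs]
    rw [pv_fold_stuck f l₂ t0 (fun t' ht' => hall t' (by simp [ht']))]
  | cons t l₁ ih =>
    intro st hst
    have ht := hall t (by simp)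
    have htne := h1 t (by simp)
    simp only [List.cons_append, List.foldl_cons]
    apply ih (fun t' ht' => h1 t' (by simp [ht'])) (fun t' ht' => hall t' (by simp [ht']))
    unfold pvStep
    split
    · simp; omega
    · exact hst

lemma pv_fold_shift (f g : String → Int) (ts : List String)
    (hg : ∀ t ∈ ts, g t = pvShift (f t)) (hf : ∀ t ∈ ts, -1 ≤ f t) :
    ∀ (a : Int) (w : String), -1 ≤ a →
      ts.foldl (pvStep g) (pvShift a, w)
        = (pvShift (ts.foldl (pvStep f) (a, w)).1, (ts.foldl (pvStep f) (a, w)).2) := by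
  induction ts with
  | nil => intro a w _; rfl
  | cons t ts ih =>
    intro a w ha
    have ht := hf t (by simp)
    have hgt := hg t (by simp)
    simp only [List.foldl_cons]
    have hstep : pvStep g (pvShift a, w) t
        = (pvShift (pvStep f (a, w) t).1, (pvStep f (a, w) t).2) := by
      simp only [pvStep, hgt, pvShift]
      split_ifs <;> simp_all <;> omega
    rw [hstep]
    have hge : -1 ≤ (pvStep f (a, w) t).1 := by
      unfold pvStep; split
      · simpa using ht
      · simpa using ha
    have := ih (fun t' ht' => hg t' (by simp [ht'])) (fun t' ht' => hf t' (by simp [ht']))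
      (pvStep f (a, w) t).1 (pvStep f (a, w) t).2 hge
    simpa using this

lemma pv_ref_main (cs : List Char) :
    pvScanRef cs = (pvW2N.get? (pvChFold cs).2).getD "" := by
  induction cs with
  | nil => decide
  | cons c rest ih =>
    cases hfind : pvForward.find? (fun t => PySem.Chars.startswith (c :: rest) t.toList) with
    | none =>
      have hnone := List.find?_eq_none.mp hfind
      have hsh : pvChFold (c :: rest) = (pvShift (pvChFold rest).1, (pvChFold rest).2) := by
        unfold pvChFold
        have hsf := pv_fold_shift (fun t => PySem.Chars.find rest t.toList)
          (fun t => PySem.Chars.find (c :: rest) t.toList) pvForward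
          (fun t htm => pv_find_cons c rest t.toList (by simpa using hnone t htm))
          (fun t _ => PySem.Chars.neg_one_le_find _ _)
          (-1) "0" (by omega)
        simpa [pvShift] using hsf
      simp only [pvScanRef, hfind]
      rw [ih, hsh]
    | some t0 =>
      simp only [pvScanRef, hfind]
      obtain ⟨hp0, l₁, l₂, hdecomp, hbefore⟩ := List.find?_eq_some_iff_append.mp hfind
      have hfold : (pvChFold (c :: rest)).2 = t0 := by
        unfold pvChFold
        rw [hdecomp]
        apply pv_fold_hit
        · intro t htm hft
          exact (by simpa using hbefore t htm : ¬ _)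
            (pv_startswith_of_find_zero (c :: rest) t.toList hft)
        · exact pv_find_zero_of_startswith _ _ hp0
        · exact fun t _ => PySem.Chars.neg_one_le_find _ _
        · exact Or.inl rfl
      rw [hfold]

-- startswith against a single-character pattern is a head comparison
lemma pv_sw_single (c k : Char) (rest : List Char) :
    PySem.Chars.startswith (c :: rest) [k] = (k == c) := by
  simp [PySem.Chars.startswith, List.isPrefixOf]

lemma pv_digit_enum (c : Char) (h : '0' ≤ c ∧ c ≤ '9') :
    c = '0' ∨ c = '1' ∨ c = '2' ∨ c = '3' ∨ c = '4' ∨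
    c = '5' ∨ c = '6' ∨ c = '7' ∨ c = '8' ∨ c = '9' := by
  obtain ⟨h1, h2⟩ := h
  have hl : 48 ≤ c.toNat := h1
  have hr : c.toNat ≤ 57 := h2
  have hofn := Char.ofNat_toNat c
  interval_cases h : c.toNat <;> (subst hofn; decide)

-- B's scan equals the reference scan
lemma pvB_eq_ref (cs : List Char) : pvScanB cs = pvScanRef cs := by
  induction cs with
  | nil => rfl
  | cons c rest ih =>
    by_cases hd : '0' ≤ c ∧ c ≤ '9'
    · rw [pvScanB, if_pos hd]
      rcases pv_digit_enum c hd with h|h|h|h|h|h|h|h|h|h <;>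
        subst h <;>
        (simp [pvScanRef, pvForward, List.find?, PySem.Chars.startswith, List.isPrefixOf];
         decide)
    · rw [pvScanB, if_neg hd]
      have hdig : ∀ k : Char, k ∈ (['1','2','3','4','5','6','7','8','9','0'] : List Char) →
          (k == c) = false := by
        intro k hk
        apply beq_eq_false_iff_ne.mpr
        intro hkc
        apply hd
        subst hkc
        fin_cases hk <;> exact ⟨by decide, by decide⟩
      have hsplit : pvForward
          = (pvWords.map Prod.fst) ++ ["1","2","3","4","5","6","7","8","9","0"] := by rfl
      have hfw : pvForward.find? (fun t => PySem.Chars.startswith (c :: rest) t.toList)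
          = ((pvWords.map Prod.fst).find?
              (fun t => PySem.Chars.startswith (c :: rest) t.toList)).or none := by
        rw [hsplit, List.find?_append]
        congr 1
        apply List.find?_eq_none.mpr
        intro s hs
        fin_cases hs
        · simp only [show ("1":String).toList = ['1'] from rfl, pv_sw_single,
            hdig '1' (by decide)]
          exact Bool.false_ne_true
        · simp only [show ("2":String).toList = ['2'] from rfl, pv_sw_single,
            hdig '2' (by decide)]
          exact Bool.false_ne_true
        · simp only [show ("3":String).toList = ['3'] from rfl, pv_sw_single,
            hdig '3' (by decide)]
          exact Bool.false_ne_true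
        · simp only [show ("4":String).toList = ['4'] from rfl, pv_sw_single,
            hdig '4' (by decide)]
          exact Bool.false_ne_true
        · simp only [show ("5":String).toList = ['5'] from rfl, pv_sw_single,
            hdig '5' (by decide)]
          exact Bool.false_ne_true
        · simp only [show ("6":String).toList = ['6'] from rfl, pv_sw_single,
            hdig '6' (by decide)]
          exact Bool.false_ne_true
        · simp only [show ("7":String).toList = ['7'] from rfl, pv_sw_single,
            hdig '7' (by decide)]
          exact Bool.false_ne_true
        · simp only [show ("8":String).toList = ['8'] from rfl, pv_sw_single,
            hdig '8' (by decide)]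
          exact Bool.false_ne_true
        · simp only [show ("9":String).toList = ['9'] from rfl, pv_sw_single,
            hdig '9' (by decide)]
          exact Bool.false_ne_true
        · simp only [show ("0":String).toList = ['0'] from rfl, pv_sw_single,
            hdig '0' (by decide)]
          exact Bool.false_ne_true
      rw [List.find?_map] at hfw
      cases hw : pvWords.find? (fun p => PySem.Chars.startswith (c :: rest) p.1.toList) with
      | none =>
        have : pvForward.find? (fun t => PySem.Chars.startswith (c :: rest) t.toList) = none := by
          rw [hfw]
          have : pvWords.find?
              ((fun t => PySem.Chars.startswith (c :: rest) t.toList) ∘ Prod.fst) = none := hw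
          rw [this]; rfl
        simp only [pvScanRef, this]
        exact ih
      | some pr =>
        have hfsome : pvForward.find? (fun t => PySem.Chars.startswith (c :: rest) t.toList)
            = some pr.1 := by
          rw [hfw]
          have : pvWords.find?
              ((fun t => PySem.Chars.startswith (c :: rest) t.toList) ∘ Prod.fst) = some pr := hw
          rw [this]; rfl
        have hmem : pr ∈ pvWords := List.mem_of_find?_eq_some hw
        have hval : (pvW2N.get? pr.1).getD "" = pr.2 := by
          fin_cases hmem <;> decide
        simp only [pvScanRef, hfsome, hval]

-- ===== VERDICT (by name: the statement is the Claim_ definition above) =====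
theorem findFirstNum_spec : Claim_equal_findFirstNum := by
  intro line _
  unfold Spec_findFirstNum findFirstNum_alt
  rw [pvA_bridge, ← pv_ref_main, pvB_eq_ref]
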